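-- pv_equiv track=rewrite | github.com/SavageCooPigeonX/keystroke-telemetry | src/管w_cpm_s020_v003_d0402_缩分话_λVR_βoc/管w_cpm_s020_v003_d0402_缩分话_λVR_βoc_registry_utils_seq004_v001.py | _find_glyph
-- ===== SOURCE A (Python) =====
-- def _find_glyph(name: str, keymap: dict[str, str]) -> str:
--     if name in keymap:
--         return keymap[name]
--     parts = name.split('_seq')
--     if len(parts) > 1 and parts[0] in keymap:
--         return keymap[parts[0]]
--     for key in sorted(keymap, key=len, reverse=True):
--         if name.startswith(key + '_') or name == key:
--             return keymap[key]
--     return ''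
-- ===== SOURCE B (Python) =====
-- def _find_glyph(name: str, keymap: dict[str, str]) -> str:
--     if name in keymap:
--         return keymap[name]
--     parts = name.split('_seq')
--     if len(parts) > 1 and parts[0] in keymap:
--         return keymap[parts[0]]
--     i = name.rfind('_')
--     while i != -1:
--         if name[:i] in keymap:
--             return keymap[name[:i]]
--         i = name.rfind('_', 0, i)
--     return ''
-- ===== Notes on version B (the rewrite author's own statement) =====
-- stated objective: faster
-- what changed: Instead of sorting all keys by length and scanning them (O(n log n) per call), B enumerates the name's underscore-boundary prefixes longest-first and does one O(1) dict lookup per prefix, keeping the exact-match and _seq branches; result is independent of keymap size.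
import Mathlib
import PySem

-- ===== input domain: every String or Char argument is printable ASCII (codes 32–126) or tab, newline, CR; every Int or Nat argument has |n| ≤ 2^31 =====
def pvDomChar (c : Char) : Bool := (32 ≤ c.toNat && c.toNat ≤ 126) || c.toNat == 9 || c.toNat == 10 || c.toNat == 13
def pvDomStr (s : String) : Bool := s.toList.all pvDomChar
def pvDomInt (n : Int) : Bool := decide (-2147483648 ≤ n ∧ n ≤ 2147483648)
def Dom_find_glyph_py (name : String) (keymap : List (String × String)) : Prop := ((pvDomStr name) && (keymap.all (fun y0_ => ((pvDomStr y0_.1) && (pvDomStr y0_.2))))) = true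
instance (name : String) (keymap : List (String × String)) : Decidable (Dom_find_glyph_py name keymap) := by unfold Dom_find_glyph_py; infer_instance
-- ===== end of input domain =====

-- B replaces A's per-call sort-all-keys-then-scan with a longest-first scan of the name's own
-- underscore-boundary prefixes, one dict lookup each, so work no longer grows with the keymap size.

-- ===== PORT A =====
-- A's loop 'for key in sorted(keymap, key=len, reverse=True): if name.startswith(key+'_') or name == key: return keymap[key]'
-- (string operations ported on List Char, PySem's definitional side; 'name == key' is toList equality)
def find_glyph_py_loop (name : String) (d : PySem.Dict String String) : List String → String
  | [] => ""
  | k :: rest =>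
    if PySem.Chars.startswith name.toList (k.toList ++ ['_']) || name.toList == k.toList then
      d.getD k ""
    else find_glyph_py_loop name d rest

def find_glyph_py (name : String) (keymap : List (String × String)) : String :=
  let d := PySem.Dict.ofList keymap
  if d.contains name then d.getD name ""
  else
    let parts := PySem.Chars.splitOn name.toList "_seq".toList
    if parts.length > 1 && d.contains (String.ofList (parts.getD 0 [])) then
      d.getD (String.ofList (parts.getD 0 [])) ""
    else find_glyph_py_loop name d (PySem.List.sorted d.keys (fun k => PySem.Str.len k) true)

-- ===== PORT B =====
-- name.rfind('_', 0, i): the result is encoded shifted by one (0 = Python's -1, j+1 = found at j),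
-- so that B's while-loop below is a structural recursion; otherwise a step-for-step hand port
def find_glyph_py_alt_rfind (cs : List Char) : Nat → Nat
  | 0 => 0
  | j+1 => if cs.getD j ' ' == '_' then j+1 else find_glyph_py_alt_rfind cs j

lemma find_glyph_py_alt_rfind_le (cs : List Char) (n : Nat) : find_glyph_py_alt_rfind cs n ≤ n := by
  induction n with
  | zero => simp [find_glyph_py_alt_rfind]
  | succ m ih =>
    unfold find_glyph_py_alt_rfind
    split
    · omega
    · omega

-- B's loop 'while i != -1: if name[:i] in keymap: return keymap[name[:i]]; i = name.rfind('_', 0, i)'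
-- (argument = i+1, 0 meaning i = -1, matching the rfind encoding; name[:i] with 0 ≤ i ≤ len is List.take i)
def find_glyph_py_alt_loop (cs : List Char) (d : PySem.Dict String String) : Nat → String
  | 0 => ""
  | j+1 =>
    if d.contains (String.ofList (List.take j cs)) then
      d.getD (String.ofList (List.take j cs)) ""
    else find_glyph_py_alt_loop cs d (find_glyph_py_alt_rfind cs j)
  decreasing_by exact Nat.lt_succ_of_le (find_glyph_py_alt_rfind_le cs j)

def find_glyph_py_alt (name : String) (keymap : List (String × String)) : String :=
  let d := PySem.Dict.ofList keymap
  if d.contains name then d.getD name ""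
  else
    let parts := PySem.Chars.splitOn name.toList "_seq".toList
    if parts.length > 1 && d.contains (String.ofList (parts.getD 0 [])) then
      d.getD (String.ofList (parts.getD 0 [])) ""
    else find_glyph_py_alt_loop name.toList d (find_glyph_py_alt_rfind name.toList name.toList.length)

-- ===== PRECONDITION & SPEC =====
def Spec_find_glyph_py (name : String) (keymap : List (String × String)) (out : String) : Prop := out = find_glyph_py_alt name keymap
instance (name : String) (keymap : List (String × String)) (out : String) : Decidable (Spec_find_glyph_py name keymap out) := by unfold Spec_find_glyph_py; infer_instance

-- ===== CLAIM (what is proved, stated in full; the proofs are below) =====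
def Claim_equal_find_glyph_py : Prop := ∀ (name : String) (keymap : List (String × String)), Dom_find_glyph_py name keymap → Spec_find_glyph_py name keymap (find_glyph_py name keymap)

-- ===== LEMMAS AND PROOFS =====

-- A's loop condition, as a predicate on keys
def pvMatch (name : String) (k : String) : Bool :=
  PySem.Chars.startswith name.toList (k.toList ++ ['_']) || name.toList == k.toList

-- B's loop condition, as a predicate on positions
def pvCond (cs : List Char) (d : PySem.Dict String String) (i : Nat) : Bool :=
  (cs.getD i ' ' == '_') && d.contains (String.ofList (List.take i cs))

lemma aLoop_eq_find? (name : String) (d : PySem.Dict String String) (ys : List String) :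
    find_glyph_py_loop name d ys =
      match ys.find? (pvMatch name) with
      | some k => d.getD k ""
      | none => "" := by
  induction ys with
  | nil => rfl
  | cons k rest ih =>
    have hstep : find_glyph_py_loop name d (k :: rest)
        = if pvMatch name k then d.getD k "" else find_glyph_py_loop name d rest := rfl
    rw [hstep, List.find?_cons]
    cases h : pvMatch name k
    · simp [ih]
    · simp

lemma bLoop_eq_find? (cs : List Char) (d : PySem.Dict String String) (n : Nat) :
    find_glyph_py_alt_loop cs d (find_glyph_py_alt_rfind cs n) =
      match (List.range n).reverse.find? (pvCond cs d) with
      | some i => d.getD (String.ofList (List.take i cs)) ""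
      | none => "" := by
  induction n with
  | zero => simp [find_glyph_py_alt_rfind, find_glyph_py_alt_loop]
  | succ m ih =>
    have hrev : (List.range (m+1)).reverse = m :: (List.range m).reverse := by
      simp [List.range_succ]
    rw [hrev, List.find?_cons]
    unfold find_glyph_py_alt_rfind
    cases hu : cs.getD m ' ' == '_'
    · have hc : pvCond cs d m = false := by
        unfold pvCond
        rw [hu, Bool.false_and]
      simp only [Bool.false_eq_true, if_false, hc]
      exact ih
    · have hstep : find_glyph_py_alt_loop cs d (m+1)
          = if d.contains (String.ofList (List.take m cs)) then
              d.getD (String.ofList (List.take m cs)) ""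
            else find_glyph_py_alt_loop cs d (find_glyph_py_alt_rfind cs m) := by
        rw [find_glyph_py_alt_loop]
      have hc : pvCond cs d m = d.contains (String.ofList (List.take m cs)) := by
        unfold pvCond
        rw [hu, Bool.true_and]
      simp only [if_true, hstep, hc]
      cases h : d.contains (String.ofList (List.take m cs))
      · simp [ih]
      · simp

lemma prefix_snoc_iff (l cs : List Char) :
    (l ++ ['_'] <+: cs) ↔
      (l.length < cs.length ∧ List.take l.length cs = l ∧ cs.getD l.length ' ' = '_') := by
  constructor
  · rintro ⟨t, ht⟩
    subst ht
    refine ⟨by simp, ?_, ?_⟩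
    · rw [List.append_assoc]
      exact List.take_left
    · rw [List.append_assoc]
      simp [List.getD_eq_getElem?_getD]
  · rintro ⟨hlt, htake, hget⟩
    have hd : List.drop l.length cs = cs[l.length] :: List.drop (l.length + 1) cs :=
      List.drop_eq_getElem_cons hlt
    have hc : cs[l.length] = '_' := by
      have : cs.getD l.length ' ' = cs[l.length] := by
        simp [List.getD_eq_getElem?_getD, List.getElem?_eq_getElem hlt]
      rw [this] at hget; exact hget
    refine ⟨List.drop (l.length + 1) cs, ?_⟩
    calc l ++ ['_'] ++ List.drop (l.length + 1) cs
        = l ++ ('_' :: List.drop (l.length + 1) cs) := by simp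
      _ = List.take l.length cs ++ List.drop l.length cs := by rw [htake, hd, hc]
      _ = cs := List.take_append_drop _ _

-- a match of A's loop yields its position, and vice versa
lemma match_to_cond (name : String) (d : PySem.Dict String String) (k : String)
    (hno : d.contains name = false)
    (hk : k ∈ d.keys) (hm : pvMatch name k = true) :
    k.toList.length < name.toList.length ∧
    String.ofList (List.take k.toList.length name.toList) = k ∧
    pvCond name.toList d k.toList.length = true := by
  have hne : name.toList ≠ k.toList := by
    intro h
    have : name = k := String.toList_inj.mp h
    subst this
    rw [PySem.Dict.contains_eq_decide_mem_keys] at hno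
    simp [hk] at hno
  have hsw : PySem.Chars.startswith name.toList (k.toList ++ ['_']) = true := by
    rcases Bool.or_eq_true_iff.mp hm with h | h
    · exact h
    · exact absurd (by simpa using h) hne
  have hpre := (prefix_snoc_iff k.toList name.toList).mp
    ((PySem.Chars.startswith_iff _ _).mp hsw)
  obtain ⟨hlt, htake, hget⟩ := hpre
  have hkey : String.ofList (List.take k.toList.length name.toList) = k := by
    rw [htake, String.ofList_toList]
  refine ⟨hlt, hkey, ?_⟩
  unfold pvCond
  rw [hkey, hget]
  simp [PySem.Dict.contains_eq_decide_mem_keys, hk]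

lemma cond_to_match (name : String) (d : PySem.Dict String String) (i : Nat)
    (hc : pvCond name.toList d i = true) :
    i < name.toList.length ∧
    String.ofList (List.take i name.toList) ∈ d.keys ∧
    pvMatch name (String.ofList (List.take i name.toList)) = true ∧
    (String.ofList (List.take i name.toList)).toList.length = i := by
  unfold pvCond at hc
  rcases Bool.and_eq_true_iff.mp hc with ⟨hget, hcont⟩
  have hget : name.toList.getD i ' ' = '_' := by simpa using hget
  have hlt : i < name.toList.length := by
    by_contra h
    have h0 : name.toList.getD i ' ' = ' ' := by
      simp [List.getD_eq_getElem?_getD, List.getElem?_eq_none (by omega : name.toList.length ≤ i)]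
    rw [h0] at hget
    exact absurd hget (by decide)
  have hmin : (List.take i name.toList).length = i := by rw [List.length_take]; omega
  have hlen : (String.ofList (List.take i name.toList)).toList.length = i := by
    rw [String.toList_ofList]; exact hmin
  have hmem : String.ofList (List.take i name.toList) ∈ d.keys := by
    rw [PySem.Dict.contains_eq_decide_mem_keys] at hcont
    simpa using hcont
  refine ⟨hlt, hmem, ?_, hlen⟩
  unfold pvMatch
  apply Bool.or_eq_true_iff.mpr
  left
  apply (PySem.Chars.startswith_iff _ _).mpr
  apply (prefix_snoc_iff _ _).mpr
  rw [String.toList_ofList, hmin]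
  exact ⟨hlt, rfl, hget⟩

lemma find?_revRange_eq_some (q : Nat → Bool) (n i : Nat)
    (hlt : i < n) (hq : q i = true) (hmax : ∀ j, i < j → j < n → q j = false) :
    (List.range n).reverse.find? q = some i := by
  induction n with
  | zero => omega
  | succ m ih =>
    have hrev : (List.range (m+1)).reverse = m :: (List.range m).reverse := by
      simp [List.range_succ]
    rw [hrev, List.find?_cons]
    by_cases hi : i = m
    · subst hi; simp [hq]
    · have him : i < m := by omega
      have hqm : q m = false := hmax m him (by omega)
      simp only [hqm]
      exact ih him (fun j h1 h2 => hmax j h1 (by omega))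

-- the third branch of A equals the third branch of B
lemma loops_agree (name : String) (d : PySem.Dict String String)
    (hno : d.contains name = false) :
    find_glyph_py_loop name d (PySem.List.sorted d.keys (fun k => PySem.Str.len k) true) =
    find_glyph_py_alt_loop name.toList d (find_glyph_py_alt_rfind name.toList name.toList.length) := by
  set ys := PySem.List.sorted d.keys (fun k => PySem.Str.len k) true with hys
  have hperm : ys.Perm d.keys := PySem.List.sorted_perm _ _ _
  have hpair : ys.Pairwise (fun a b => PySem.Str.len b ≤ PySem.Str.len a) :=
    PySem.List.sorted_pairwise_rev _ _
  rw [aLoop_eq_find?, bLoop_eq_find?]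
  rcases hfind : ys.find? (pvMatch name) with _ | k
  · -- no key matches, so no position satisfies pvCond
    have hnone : (List.range name.toList.length).reverse.find? (pvCond name.toList d) = none := by
      apply List.find?_eq_none.mpr
      intro j _ hcj
      obtain ⟨_, hmem, hm, _⟩ := cond_to_match name d j hcj
      have : pvMatch name (String.ofList (List.take j name.toList)) = false :=
        Bool.not_eq_true _ |>.mp (List.find?_eq_none.mp hfind _ (hperm.mem_iff.mpr hmem))
      rw [hm] at this; exact absurd this (by decide)
    rw [hnone]
  · obtain ⟨hmk, as, bs, hsplit, hfail⟩ := List.find?_eq_some_iff_append.mp hfind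
    have hkys : k ∈ ys := by rw [hsplit]; simp
    have hkmem : k ∈ d.keys := hperm.mem_iff.mp hkys
    obtain ⟨hlt, hkey, hcond⟩ := match_to_cond name d k hno hkmem hmk
    have hsome : (List.range name.toList.length).reverse.find? (pvCond name.toList d)
        = some k.toList.length := by
      apply find?_revRange_eq_some _ _ _ hlt hcond
      intro j hgt _
      by_contra hcj
      rw [Bool.not_eq_false] at hcj
      obtain ⟨_, hmem, hm, hlen⟩ := cond_to_match name d j hcj
      have hys' : String.ofList (List.take j name.toList) ∈ ys := hperm.mem_iff.mpr hmem
      rw [hsplit] at hys'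
      rcases List.mem_append.mp hys' with h | h
      · have := hfail _ h
        rw [hm] at this; exact absurd this (by decide)
      · rcases List.mem_cons.mp h with h | h
        · rw [h] at hlen; omega
        · rw [hsplit] at hpair
          have hrel := (List.pairwise_append.mp hpair).2.1
          have := (List.pairwise_cons.mp hrel).1 _ h
          rw [PySem.Str.len_eq, PySem.Str.len_eq, hlen] at this
          omega
    rw [hsome]
    simp only [hkey]

-- ===== VERDICT (by name: the statement is the Claim_ definition above) =====
theorem find_glyph_py_spec : Claim_equal_find_glyph_py := by
  intro name keymap _
  unfold Spec_find_glyph_py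
  simp only [find_glyph_py, find_glyph_py_alt]
  split_ifs with h1 h2
  · rfl
  · rfl
  · exact loops_agree name (PySem.Dict.ofList keymap) (by rwa [Bool.not_eq_true] at h1)
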